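-- pv_equiv track=rewrite | github.com/comonadd/xesael | scripts/manage.py | parse_dep_generator_output
-- ===== SOURCE A (Python) =====
-- def parse_dep_generator_output(output):
--     """
--     Parse an output generated by the GCC dependency generator
--     and return a list of dependency paths.
--
--     Returns
--     -------
--     list:
--       The list containing the paths dependencies (paths of other files)
--       from a given dependency generator output.
--     """
--
--     paths = []
--     # For each character in output
--     i = 0
--     while (i < len(output)):
--         if (output[i] == ":"):
--             # Skip the colon ':'
--             i += 1
--             while i < len(output):
--                 dep_path = ""
--                 while (i < len(output)) and (output[i] != "\\") and (output[i] != " "):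
--                     if output[i] != " ":
--                         dep_path += output[i]
--                     i += 1
--                 # If path is good
--                 if len(dep_path) > 1:
--                     paths.append(dep_path)
--                 i += 1
--                 # If we seen an line feed character '\n'
--                 if (i < len(output)) and (output[i] == "n"):
--                     i += 1
--         i += 1
--     return paths
-- ===== SOURCE B (Python) =====
-- def parse_dep_generator_output(output):
--     """Parse GCC dependency-generator output and return the dependency paths.
--
--     Everything after the first ':' lists the paths, separated by spaces,
--     backslashes and escaped line breaks written as the two characters
--     backslash + 'n'.  One-character fragments are not paths and are dropped.
--     """
--     _target, colon, rest = output.partition(":")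
--     if not colon:
--         return []
--     tokens = rest.replace("\\n", " ").replace("\\", " ").split(" ")
--     return [t for t in tokens if len(t) > 1]
-- ===== Notes on version B (the rewrite author's own statement) =====
-- stated objective: idiomatic
-- what changed: Replaced A's nested index-scanning while loops by a pipeline: partition at the first colon, turn the two-character escaped line break backslash+n and each remaining backslash into spaces, split on spaces, and keep the fragments longer than one character; the per-character Python loop becomes C-level string operations.
-- intended difference: On inputs where, after the first colon, a space is immediately followed by the letter n and then a non-separator character, A silently deletes that letter (mangling path names that begin with it: ':ab next' gives ['ab','ext']); B returns the token intact (['ab','next']), which is the intended value since only backslash+n is GCC's line-break escape. — e.g. on parse_dep_generator_output(":ab next"): A returns ["ab", "ext"], B returns ["ab", "next"]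
import Mathlib
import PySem

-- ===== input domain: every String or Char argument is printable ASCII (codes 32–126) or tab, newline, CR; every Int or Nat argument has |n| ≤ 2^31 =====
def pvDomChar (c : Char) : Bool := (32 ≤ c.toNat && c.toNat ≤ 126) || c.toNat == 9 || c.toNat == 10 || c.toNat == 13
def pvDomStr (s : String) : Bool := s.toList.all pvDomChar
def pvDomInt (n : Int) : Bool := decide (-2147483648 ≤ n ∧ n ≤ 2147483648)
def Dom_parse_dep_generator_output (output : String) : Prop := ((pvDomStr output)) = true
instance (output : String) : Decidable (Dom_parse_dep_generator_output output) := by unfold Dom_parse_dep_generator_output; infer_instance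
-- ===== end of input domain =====

-- B is a partition/replace/split/filter pipeline instead of A's nested index-scanning while loops (idiomatic;
-- a timing run measured it faster by a constant factor); outside D_ the ports agree, inside D_ they differ as stated at D_.

-- ===== PORT A =====
-- innermost while of A: collect chars until '\' or ' ' (or end of input); returns (dep_path, remaining input)
def pvTokA : List Char → List Char × List Char
  | [] => ([], [])
  | c :: cs =>
    if c ≠ '\\' ∧ c ≠ ' ' then
      let (t, r) := pvTokA cs
      ((if c ≠ ' ' then c :: t else t), r)
    else ([], c :: cs)

-- A's "if we have seen an 'n', skip it" step
def pvDropN : List Char → List Char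
  | 'n' :: r => r
  | r => r

-- the middle while of A (entered with the index just past the colon); every trip consumes at
-- least one character, so fuel = length + 1 never runs out (inner_eq_aux below tracks this)
def pvInnerAF : Nat → List Char → List (List Char)
  | 0, _ => []
  | f + 1, s =>
    if s = [] then []
    else
      let tok := (pvTokA s).1
      let keep := if tok.length > 1 then [tok] else []
      match (pvTokA s).2 with
      | [] => keep
      | _ :: rest' => keep ++ pvInnerAF f (pvDropN rest')

def pvInnerA (s : List Char) : List (List Char) := pvInnerAF (s.length + 1) s

-- outer while of A: scan for the first ':'; the inner loop consumes the rest of the input, so the outer loop then stops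
def pvOuterA : List Char → List (List Char)
  | [] => []
  | c :: cs => if c = ':' then pvInnerA cs else pvOuterA cs

def parse_dep_generator_output (output : String) : List String :=
  (pvOuterA output.toList).map (fun cs => String.ofList cs)

-- ===== PORT B =====
-- output.partition(":") — hand port (partition has no PySem primitive): the text after the FIRST ':', none when there is no ':' (exact)
def pvAfterColonB : List Char → Option (List Char)
  | [] => none
  | c :: cs => if c = ':' then some cs else pvAfterColonB cs

def parse_dep_generator_output_alt (output : String) : List String :=
  match pvAfterColonB output.toList with
  | none => []
  | some rest =>
    let tokens := PySem.Chars.splitOn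
      (PySem.Chars.replace (PySem.Chars.replace rest ['\\', 'n'] [' ']) ['\\'] [' ']) [' ']
    (tokens.filter (fun t => t.length > 1)).map (fun cs => String.ofList cs)

-- ===== PRECONDITION & SPEC =====
-- On inputs where, after the first colon, a space is immediately followed by 'n' and then a
-- non-separator character, A silently deletes that 'n' (mangling path names that begin with 'n');
-- B keeps the token intact, which is the intended value: only backslash+n is GCC's line-break escape.
def D_parse_dep_generator_output (output : String) : Prop :=
  let r := (output.toList.dropWhile (· ≠ ':')).drop 1
  ∃ w ∈ (r.zip (r.drop 1)).zip (r.drop 2), w.1.1 = ' ' ∧ w.1.2 = 'n' ∧ w.2 ∉ [' ', '\\']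
instance (output : String) : Decidable (D_parse_dep_generator_output output) := by
  unfold D_parse_dep_generator_output; infer_instance

def Spec_parse_dep_generator_output (output : String) (out : List String) : Prop :=
  ¬ D_parse_dep_generator_output output → out = parse_dep_generator_output_alt output
instance (output : String) (out : List String) : Decidable (Spec_parse_dep_generator_output output out) := by
  unfold Spec_parse_dep_generator_output; infer_instance

def pvDiffWitness_parse_dep_generator_output : String := ":ab next"
def pvDiffWitnessOut_parse_dep_generator_output : (List String) × (List String) :=
  (["ab", "ext"], ["ab", "next"])

-- ===== CLAIM (what is proved, stated in full; the proofs are below) =====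
def Claim_unchanged_parse_dep_generator_output : Prop := ∀ (output : String), Dom_parse_dep_generator_output output → Spec_parse_dep_generator_output output (parse_dep_generator_output output)
def Claim_changed_parse_dep_generator_output : Prop := Dom_parse_dep_generator_output (pvDiffWitness_parse_dep_generator_output) ∧ D_parse_dep_generator_output (pvDiffWitness_parse_dep_generator_output) ∧ parse_dep_generator_output (pvDiffWitness_parse_dep_generator_output) = pvDiffWitnessOut_parse_dep_generator_output.1 ∧ parse_dep_generator_output_alt (pvDiffWitness_parse_dep_generator_output) = pvDiffWitnessOut_parse_dep_generator_output.2 ∧ pvDiffWitnessOut_parse_dep_generator_output.1 ≠ pvDiffWitnessOut_parse_dep_generator_output.2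

def Claim_exact_parse_dep_generator_output : Prop := ∀ (output : String), Dom_parse_dep_generator_output output → D_parse_dep_generator_output output → parse_dep_generator_output output ≠ parse_dep_generator_output_alt output

-- ===== LEMMAS AND PROOFS =====

-- proof-side scanner equivalent to D_'s window condition
def pvBad : List Char → Bool
  | a :: b :: c :: r =>
      (decide (a = ' ') && decide (b = 'n') && decide (c ≠ ' ') && decide (c ≠ '\\')) || pvBad (b :: c :: r)
  | _ => false

theorem pvBad_iff : ∀ (s : List Char),
    pvBad s = true ↔ (∃ w ∈ (s.zip (s.drop 1)).zip (s.drop 2),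
      w.1.1 = ' ' ∧ w.1.2 = 'n' ∧ ¬ w.2 = ' ' ∧ ¬ w.2 = '\\')
  | [] => by simp [pvBad]
  | [a] => by simp [pvBad]
  | [a, b] => by simp [pvBad]
  | a :: b :: c :: r => by
    rw [show pvBad (a :: b :: c :: r) =
        ((decide (a = ' ') && decide (b = 'n') && decide (c ≠ ' ') && decide (c ≠ '\\')) ||
          pvBad (b :: c :: r)) from rfl]
    have ih := pvBad_iff (b :: c :: r)
    simp only [List.drop, List.zip_cons_cons, List.mem_cons, Bool.or_eq_true,
      Bool.and_eq_true, decide_eq_true_eq] at ih ⊢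
    rw [ih]
    constructor
    · rintro (h | ⟨w, hw, hs⟩)
      · exact ⟨((a, b), c), Or.inl rfl, h.1.1.1, h.1.1.2, h.1.2, h.2⟩
      · exact ⟨w, Or.inr hw, hs⟩
    · rintro ⟨w, hw | hw, hs⟩
      · subst hw
        exact Or.inl ⟨⟨⟨hs.1, hs.2.1⟩, hs.2.2.1⟩, hs.2.2.2⟩
      · exact Or.inr ⟨w, hw, hs⟩

-- proof-side pointwise form of .replace('\\', ' ')
def pvRepl (c : Char) : Char := if c = '\\' then ' ' else c

-- proof-side structural form of .replace('\\n', ' ')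
def pvRep1 : List Char → List Char
  | [] => []
  | c :: r =>
    if c = '\\' ∧ r.head? = some 'n' then ' ' :: pvRep1 r.tail
    else c :: pvRep1 r
termination_by s => s.length
decreasing_by all_goals (simp [List.length_tail]; try omega)

-- proof-side fused form of the two replaces: '\'+'n' and lone '\' both become one ' '
def pvSubst : List Char → List Char
  | [] => []
  | c :: r =>
    if c = '\\' then
      if r.head? = some 'n' then ' ' :: pvSubst r.tail else ' ' :: pvSubst r
    else c :: pvSubst r
termination_by s => s.length
decreasing_by all_goals (simp [List.length_tail]; try omega)

-- proof-side structural form of .split(" ")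
def pvSplitP : List Char → List (List Char)
  | [] => [[]]
  | c :: cs =>
    if c = ' ' then [] :: pvSplitP cs
    else
      match pvSplitP cs with
      | [] => [[c]]
      | p :: ps => (c :: p) :: ps

theorem pvSplitP_head_tail (l : List Char) : pvSplitP l = (pvSplitP l).headI :: (pvSplitP l).tail := by
  match l with
  | [] => simp [pvSplitP]
  | c :: cs =>
    simp only [pvSplitP]
    split
    · simp
    · split <;> simp

theorem go_split (fuel : Nat) : ∀ (l cur : List Char) (accs : List (List Char)),
    l.length ≤ fuel →
    PySem.Chars.splitOn.go [' '] fuel l cur accs =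
      accs.reverse ++ (cur.reverse ++ (pvSplitP l).headI) :: (pvSplitP l).tail := by
  induction fuel with
  | zero =>
    intro l cur accs h
    have : l = [] := by simpa using List.length_eq_zero_iff.mp (Nat.le_zero.mp h)
    subst this
    simp [PySem.Chars.splitOn.go, pvSplitP]
  | succ f ih =>
    intro l cur accs h
    match l with
    | [] => simp [PySem.Chars.splitOn.go, pvSplitP]
    | c :: rest =>
      by_cases hc : c = ' '
      · subst hc
        have : PySem.Chars.splitOn.go [' '] (f+1) (' ' :: rest) cur accs
            = PySem.Chars.splitOn.go [' '] f rest [] (cur.reverse :: accs) := by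
          simp [PySem.Chars.splitOn.go, List.isPrefixOf]
        rw [this, ih rest [] (cur.reverse :: accs) (by simpa using Nat.le_of_succ_le_succ h)]
        simp [pvSplitP, ← pvSplitP_head_tail rest]
      · have : PySem.Chars.splitOn.go [' '] (f+1) (c :: rest) cur accs
            = PySem.Chars.splitOn.go [' '] f rest (c :: cur) accs := by
          simp [PySem.Chars.splitOn.go, List.isPrefixOf]
          exact fun h' => absurd h'.symm hc
        rw [this, ih rest (c :: cur) accs (by simpa using Nat.le_of_succ_le_succ h)]
        simp only [pvSplitP, hc, if_false]
        rw [pvSplitP_head_tail rest]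
        simp

theorem splitOn_eq (s : List Char) : PySem.Chars.splitOn s [' '] = pvSplitP s := by
  unfold PySem.Chars.splitOn
  rw [go_split (s.length + 1) s [] [] (by omega)]
  simpa using (pvSplitP_head_tail s).symm

theorem go_replace (fuel : Nat) : ∀ (l acc : List Char),
    l.length ≤ fuel →
    PySem.Chars.replace.go ['\\'] [' '] fuel l acc =
      acc.reverse ++ l.map (fun c => if c = '\\' then ' ' else c) := by
  induction fuel with
  | zero =>
    intro l acc h
    have : l = [] := by simpa using List.length_eq_zero_iff.mp (Nat.le_zero.mp h)
    subst this
    simp [PySem.Chars.replace.go]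
  | succ f ih =>
    intro l acc h
    match l with
    | [] => simp [PySem.Chars.replace.go]
    | c :: rest =>
      by_cases hc : c = '\\'
      · subst hc
        have : PySem.Chars.replace.go ['\\'] [' '] (f+1) ('\\' :: rest) acc
            = PySem.Chars.replace.go ['\\'] [' '] f rest (' ' :: acc) := by
          simp [PySem.Chars.replace.go, List.isPrefixOf]
        rw [this, ih rest (' ' :: acc) (by simpa using Nat.le_of_succ_le_succ h)]
        simp
      · have : PySem.Chars.replace.go ['\\'] [' '] (f+1) (c :: rest) acc
            = PySem.Chars.replace.go ['\\'] [' '] f rest (c :: acc) := by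
          simp [PySem.Chars.replace.go, List.isPrefixOf]
          exact fun h' => absurd h'.symm hc
        rw [this, ih rest (c :: acc) (by simpa using Nat.le_of_succ_le_succ h)]
        simp [hc]

theorem replace_eq (s : List Char) :
    PySem.Chars.replace s ['\\'] [' '] = s.map pvRepl := by
  unfold PySem.Chars.replace
  have h2 := go_replace s.length s [] (le_refl _)
  simp at h2
  simpa [pvRepl] using h2

theorem go_replace2 (fuel : Nat) : ∀ (l acc : List Char),
    l.length ≤ fuel →
    PySem.Chars.replace.go ['\\', 'n'] [' '] fuel l acc = acc.reverse ++ pvRep1 l := by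
  induction fuel with
  | zero =>
    intro l acc h
    have : l = [] := by simpa using List.length_eq_zero_iff.mp (Nat.le_zero.mp h)
    subst this
    simp [PySem.Chars.replace.go, pvRep1]
  | succ f ih =>
    intro l acc h
    match l with
    | [] => simp [PySem.Chars.replace.go, pvRep1]
    | c :: rest =>
      by_cases hp : c = '\\' ∧ rest.head? = some 'n'
      · obtain ⟨hc, hr⟩ := hp
        subst hc
        obtain ⟨r2, rfl⟩ : ∃ r2, rest = 'n' :: r2 := by
          cases rest with
          | nil => simp at hr
          | cons d r2 =>
            have hd : d = 'n' := by simpa using hr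
            exact ⟨r2, by rw [hd]⟩
        have hstep : PySem.Chars.replace.go ['\\', 'n'] [' '] (f+1) ('\\' :: 'n' :: r2) acc
            = PySem.Chars.replace.go ['\\', 'n'] [' '] f r2 (' ' :: acc) := by
          simp [PySem.Chars.replace.go, List.isPrefixOf]
        rw [hstep, ih r2 (' ' :: acc) (by simp at h ⊢; omega)]
        simp [pvRep1]
      · have hnp : (['\\', 'n'].isPrefixOf (c :: rest)) = false := by
          cases rest with
          | nil => simp [List.isPrefixOf]
          | cons d r2 =>
            by_cases hc : c = '\\' <;> by_cases hd : d = 'n'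
            · exact absurd ⟨hc, by simp [hd]⟩ hp
            · have h1 : (('n' : Char) == d) = false := by
                simpa using fun h' => hd h'.symm
              simp [List.isPrefixOf, h1]
            · have h1 : (('\\' : Char) == c) = false := by
                simpa using fun h' => hc h'.symm
              simp [List.isPrefixOf, h1]
            · have h1 : (('\\' : Char) == c) = false := by
                simpa using fun h' => hc h'.symm
              simp [List.isPrefixOf, h1]
        have hstep : PySem.Chars.replace.go ['\\', 'n'] [' '] (f+1) (c :: rest) acc
            = PySem.Chars.replace.go ['\\', 'n'] [' '] f rest (c :: acc) := by
          simp [PySem.Chars.replace.go, hnp]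
        rw [hstep, ih rest (c :: acc) (by simpa using Nat.le_of_succ_le_succ h)]
        simp [pvRep1, hp]

theorem replace2_eq (s : List Char) :
    PySem.Chars.replace s ['\\', 'n'] [' '] = pvRep1 s := by
  unfold PySem.Chars.replace
  have h2 := go_replace2 s.length s [] (le_refl _)
  simp at h2
  simpa using h2

-- the two chained replaces fuse into pvSubst
theorem subst_eq (s : List Char) : (pvRep1 s).map pvRepl = pvSubst s := by
  induction s using pvRep1.induct with
  | case1 => simp [pvRep1, pvSubst]
  | case2 c r hp ih =>
    obtain ⟨hc, hr⟩ := hp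
    subst hc
    obtain ⟨r2, rfl⟩ : ∃ r2, r = 'n' :: r2 := by
      cases r with
      | nil => simp at hr
      | cons d r2 =>
        have hd : d = 'n' := by simpa using hr
        exact ⟨r2, by rw [hd]⟩
    rw [show pvRep1 ('\\' :: 'n' :: r2) = ' ' :: pvRep1 r2 from by simp [pvRep1]]
    simp only [List.tail_cons] at ih
    simp only [List.map_cons]
    rw [show pvSubst ('\\' :: 'n' :: r2) = ' ' :: pvSubst r2 from by simp [pvSubst]]
    simp [pvRepl, ih]
  | case3 c r hp ih =>
    rw [show pvRep1 (c :: r) = c :: pvRep1 r from by simp [pvRep1, hp]]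
    simp only [List.map_cons]
    by_cases hc : c = '\\'
    · subst hc
      have hr : r.head? ≠ some 'n' := fun h => hp ⟨rfl, h⟩
      match r with
      | [] => simp [pvSubst, pvRepl, ih]
      | d :: r2 =>
        have hd : d ≠ 'n' := fun h => hr (by simp [h])
        simp [pvSubst, pvRepl, ih, hd]
    · simp [pvSubst, pvRepl, hc, ih]

theorem pvSubst_cons_ne (c : Char) (r : List Char) (hc : c ≠ '\\') :
    pvSubst (c :: r) = c :: pvSubst r := by
  simp [pvSubst, hc]

theorem pvDropN_cons_ne (e : Char) (r : List Char) (he : e ≠ 'n') :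
    pvDropN (e :: r) = e :: r := by
  unfold pvDropN; split <;> simp_all

theorem pvSubst_bs (r : List Char) : pvSubst ('\\' :: r) = ' ' :: pvSubst (pvDropN r) := by
  match r with
  | [] => simp [pvSubst, pvDropN]
  | 'n' :: r2 => simp [pvSubst, pvDropN]
  | c :: r2 =>
    by_cases hc : c = 'n'
    · subst hc; simp [pvSubst, pvDropN]
    · rw [pvDropN_cons_ne c r2 hc]
      simp [pvSubst, hc]

theorem pvSubst_append (t z : List Char) (ht : ∀ c ∈ t, ¬ c = '\\') :
    pvSubst (t ++ z) = t ++ pvSubst z := by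
  induction t with
  | nil => simp
  | cons c t ih =>
    have hc : ¬ c = '\\' := ht c (by simp)
    simp only [List.cons_append, pvSubst_cons_ne _ _ hc]
    rw [ih (fun d hd => ht d (by simp [hd]))]

theorem pvBad_cons (x : Char) (s : List Char) (h : pvBad (x :: s) = false) : pvBad s = false := by
  match s with
  | [] => rfl
  | [c] => rfl
  | c :: d :: r =>
    rw [show pvBad (x :: c :: d :: r) =
        ((decide (x = ' ') && decide (c = 'n') && decide (d ≠ ' ') && decide (d ≠ '\\')) ||
          pvBad (c :: d :: r)) from rfl] at h
    exact (Bool.or_eq_false_iff.mp h).2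

theorem pvBad_append (t s : List Char) (h : pvBad (t ++ s) = false) : pvBad s = false := by
  induction t with
  | nil => exact h
  | cons c t ih => exact ih (pvBad_cons c (t ++ s) h)

theorem pvBad_head (c : Char) (r : List Char) (h : pvBad (' ' :: 'n' :: c :: r) = false) :
    c = ' ' ∨ c = '\\' := by
  rw [show pvBad (' ' :: 'n' :: c :: r) =
      ((decide ((' ' : Char) = ' ') && decide (('n' : Char) = 'n') && decide (c ≠ ' ') &&
          decide (c ≠ '\\')) || pvBad ('n' :: c :: r)) from rfl] at h
  have h1 := (Bool.or_eq_false_iff.mp h).1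
  by_cases hc1 : c = ' '
  · exact Or.inl hc1
  · by_cases hc2 : c = '\\'
    · exact Or.inr hc2
    · simp [hc1, hc2] at h1

theorem pvTokA_eq (s : List Char) :
    pvTokA s = (s.takeWhile (fun c => decide (c ≠ '\\' ∧ c ≠ ' ')),
                s.dropWhile (fun c => decide (c ≠ '\\' ∧ c ≠ ' '))) := by
  induction s with
  | nil => simp [pvTokA]
  | cons c cs ih =>
    by_cases h : c ≠ '\\' ∧ c ≠ ' '
    · simp [pvTokA, h, ih]
    · simp [pvTokA, h]

theorem pvSplitP_append (t l : List Char) (h : ∀ c ∈ t, ¬ c = ' ') :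
    pvSplitP (t ++ l) = (t ++ (pvSplitP l).headI) :: (pvSplitP l).tail := by
  induction t with
  | nil => simpa using pvSplitP_head_tail l
  | cons c t iht =>
    have hc : ¬ c = ' ' := h c (by simp)
    have := iht (fun d hd => h d (by simp [hd]))
    simp only [List.cons_append, pvSplitP, if_neg hc, this]

theorem pvInnerAF_nil (f : Nat) : pvInnerAF f [] = [] := by
  cases f <;> simp [pvInnerAF]

-- A's inner loop against B's subst-split-filter pipeline, on inputs without A's space-'n' mangling site
theorem inner_eq_aux (fuel : Nat) : ∀ (s : List Char), s.length < fuel → pvBad s = false →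
    pvInnerAF fuel s = (pvSplitP (pvSubst s)).filter (fun t => t.length > 1) := by
  induction fuel with
  | zero => intro s h _; omega
  | succ f ih =>
    intro s hlen hbad
    match s with
    | [] => simp [pvInnerAF, pvSubst, pvSplitP, List.filter]
    | c :: cs =>
      have hTok := pvTokA_eq (c :: cs)
      obtain ⟨t, ht⟩ : ∃ t, (c :: cs).takeWhile (fun c => decide (c ≠ '\\' ∧ c ≠ ' ')) = t := ⟨_, rfl⟩
      obtain ⟨r, hrd⟩ : ∃ r, (c :: cs).dropWhile (fun c => decide (c ≠ '\\' ∧ c ≠ ' ')) = r := ⟨_, rfl⟩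
      rw [ht, hrd] at hTok
      have hsplit : t ++ r = c :: cs := by
        rw [← ht, ← hrd]; exact List.takeWhile_append_dropWhile
      have htok : ∀ d ∈ t, ¬ d = '\\' ∧ ¬ d = ' ' := by
        intro d hd
        rw [← ht] at hd
        have := List.mem_takeWhile_imp hd
        simpa using this
      have htok_nosp : ∀ d ∈ t, ¬ d = ' ' := fun d hd => (htok d hd).2
      have htok_nobs : ∀ d ∈ t, ¬ d = '\\' := fun d hd => (htok d hd).1
      have hsubst : pvSubst (c :: cs) = t ++ pvSubst r := by
        rw [← hsplit]; exact pvSubst_append t (by exact r) htok_nobs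
      cases r with
      | nil =>
        have hstep : pvInnerAF (f + 1) (c :: cs) = if t.length > 1 then [t] else [] := by
          simp only [pvInnerAF, if_neg (by simp : ¬ (c :: cs : List Char) = [])]
          rw [hTok]
        rw [hstep, hsubst]
        simp only [pvSubst, List.append_nil]
        rw [show (t : List Char) = t ++ [] from by simp, pvSplitP_append t [] htok_nosp]
        simp only [pvSplitP, List.headI, List.tail]
        by_cases hlen1 : t.length > 1 <;> simp [hlen1, List.filter]
      | cons d rest' =>
        have hd : (fun c => decide (c ≠ '\\' ∧ c ≠ ' ')) d = false := by
          have hh := List.head?_dropWhile_not (fun c => decide (c ≠ '\\' ∧ c ≠ ' ')) (c :: cs)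
          rw [hrd] at hh
          simpa using hh
        have hdsep : d = '\\' ∨ d = ' ' := by
          simp at hd
          by_cases hb : d = '\\'
          · exact Or.inl hb
          · exact Or.inr (hd hb)
        have hstep : pvInnerAF (f + 1) (c :: cs) =
            (if t.length > 1 then [t] else []) ++ pvInnerAF f (pvDropN rest') := by
          simp only [pvInnerAF, if_neg (by simp : ¬ (c :: cs : List Char) = [])]
          rw [hTok]
        have hlen_tr : t.length + (rest'.length + 1) = cs.length + 1 := by
          have := congrArg List.length hsplit
          simpa using this
        have hbad_r : pvBad (d :: rest') = false := by
          rw [← hsplit] at hbad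
          exact pvBad_append t _ hbad
        cases hdsep with
        | inl hbs =>
          -- separator is '\': both sides consume the escaped 'n' (if any)
          subst hbs
          have hdrop_len : (pvDropN rest').length < f := by
            have hle : (pvDropN rest').length ≤ rest'.length := by
              unfold pvDropN; split <;> simp
            simp at hlen
            omega
          have hbad_drop : pvBad (pvDropN rest') = false := by
            have h1 := pvBad_cons _ _ hbad_r
            unfold pvDropN
            split
            next => exact pvBad_cons _ _ h1
            next => exact h1
          rw [hstep, ih _ hdrop_len hbad_drop, hsubst, pvSubst_bs]
          rw [pvSplitP_append t _ htok_nosp]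
          simp only [pvSplitP, if_pos rfl, List.headI, List.tail, List.append_nil]
          rw [pvSplitP_head_tail (pvSubst (pvDropN rest'))]
          by_cases hlen1 : t.length > 1 <;>
            simp [hlen1, List.filter_cons, ← pvSplitP_head_tail (pvSubst (pvDropN rest'))]
        | inr hsp =>
          subst hsp
          have hsubst2 : pvSubst (' ' :: rest') = ' ' :: pvSubst rest' :=
            pvSubst_cons_ne _ _ (by decide)
          cases rest' with
          | nil =>
            rw [hstep]
            simp only [pvDropN, pvInnerAF_nil, List.append_nil]
            rw [hsubst, hsubst2]
            rw [pvSplitP_append t _ htok_nosp]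
            simp only [pvSplitP, if_pos rfl, pvSubst, List.headI, List.tail]
            by_cases hlen1 : t.length > 1 <;> simp [hlen1, List.filter_cons, List.filter]
          | cons e r2 =>
            by_cases he : e = 'n'
            · subst he
              -- A skips this 'n'; no mangling site forces what follows to be a separator or the end
              have hdrop : pvDropN ('n' :: r2) = r2 := rfl
              cases r2 with
              | nil =>
                rw [hstep, hdrop]
                simp only [pvInnerAF_nil, List.append_nil]
                rw [hsubst, hsubst2, pvSubst_cons_ne 'n' [] (by decide)]
                rw [pvSplitP_append t _ htok_nosp]
                simp only [pvSplitP, pvSubst, if_pos rfl,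
                  if_neg (by decide : ¬ ('n' : Char) = ' '), List.headI, List.tail]
                by_cases hlen1 : t.length > 1 <;> simp [hlen1, List.filter_cons, List.filter]
              | cons g r3 =>
                have hg : g = ' ' ∨ g = '\\' := pvBad_head g r3 hbad_r
                have hlen_g : (g :: r3 : List Char).length < f := by
                  simp at hlen_tr hlen ⊢
                  omega
                have hbad_g : pvBad (g :: r3) = false :=
                  pvBad_cons _ _ (pvBad_cons _ _ hbad_r)
                obtain ⟨X, hX⟩ : ∃ X, pvSubst (g :: r3) = ' ' :: X := by
                  cases hg with
                  | inl h' => subst h'; exact ⟨pvSubst r3, pvSubst_cons_ne _ _ (by decide)⟩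
                  | inr h' => subst h'; exact ⟨pvSubst (pvDropN r3), pvSubst_bs r3⟩
                rw [hstep, hdrop, ih _ hlen_g hbad_g, hsubst, hsubst2,
                  pvSubst_cons_ne 'n' _ (by decide), hX]
                rw [pvSplitP_append t _ htok_nosp]
                simp only [pvSplitP, if_pos rfl, if_neg (by decide : ¬ ('n' : Char) = ' '),
                  List.headI, List.tail]
                rw [pvSplitP_head_tail X]
                by_cases hlen1 : t.length > 1 <;>
                  simp [hlen1, List.filter_cons, ← pvSplitP_head_tail X]
            · -- rest' does not start with 'n': no skip on either side
              have hdrop : pvDropN (e :: r2) = e :: r2 := pvDropN_cons_ne e r2 he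
              have hlen_e : (e :: r2 : List Char).length < f := by
                simp at hlen_tr hlen ⊢
                omega
              have hbad_e : pvBad (e :: r2) = false := pvBad_cons _ _ hbad_r
              rw [hstep, hdrop, ih _ hlen_e hbad_e, hsubst, hsubst2]
              rw [pvSplitP_append t _ htok_nosp]
              simp only [pvSplitP, if_pos rfl, List.headI, List.tail]
              rw [pvSplitP_head_tail (pvSubst (e :: r2))]
              by_cases hlen1 : t.length > 1 <;>
                simp [hlen1, List.filter_cons, ← pvSplitP_head_tail (pvSubst (e :: r2))]

-- outer scan: A's colon search lines up with B's partition and with D_'s dropWhile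
theorem outer_eq (s : List Char)
    (hbad : pvBad ((s.dropWhile (fun c => c ≠ ':')).drop 1) = false) :
    pvOuterA s = match pvAfterColonB s with
      | none => []
      | some rest => (pvSplitP (pvSubst rest)).filter (fun t => t.length > 1) := by
  induction s with
  | nil => simp [pvOuterA, pvAfterColonB]
  | cons c cs ih =>
    by_cases h : c = ':'
    · subst h
      have hbad' : pvBad cs = false := by
        simpa [List.dropWhile] using hbad
      simp only [pvOuterA, pvAfterColonB, if_pos rfl, pvInnerA]
      exact inner_eq_aux (cs.length + 1) cs (by omega) hbad'
    · have hbad' : pvBad ((cs.dropWhile (fun c => c ≠ ':')).drop 1) = false := by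
        simpa [List.dropWhile, h] using hbad
      simp only [pvOuterA, pvAfterColonB, if_neg h]
      exact ih hbad'

-- ===== VERDICT (by name: the statement is the Claim_ definition above) =====
theorem parse_dep_generator_output_spec : Claim_unchanged_parse_dep_generator_output := by
  intro output _ hnD
  have hbad : pvBad ((output.toList.dropWhile (fun c => c ≠ ':')).drop 1) = false := by
    unfold D_parse_dep_generator_output at hnD
    rw [Bool.eq_false_iff]
    intro hT
    obtain ⟨w, hw, h1, h2, h3, h4⟩ := (pvBad_iff _).mp hT
    exact hnD ⟨w, hw, h1, h2, by simp [h3, h4]⟩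
  unfold parse_dep_generator_output parse_dep_generator_output_alt
  rw [outer_eq output.toList hbad]
  cases h : pvAfterColonB output.toList with
  | none => simp
  | some rest =>
    simp only [replace2_eq, replace_eq, subst_eq, splitOn_eq]

theorem parse_dep_generator_output_changed : Claim_changed_parse_dep_generator_output := by
  unfold Claim_changed_parse_dep_generator_output; decide

-- ===== tightness: A and B differ on EVERY input in D_ =====

-- total number of characters in the kept tokens: B keeps strictly more at every mangling site
def pvPhi (l : List (List Char)) : Nat := (l.map List.length).sum

theorem pvPhi_append (x y : List (List Char)) : pvPhi (x ++ y) = pvPhi x + pvPhi y := by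
  simp [pvPhi]

theorem pvBad_step (a b c : Char) (r : List Char) :
    pvBad (a :: b :: c :: r) =
      ((decide (a = ' ') && decide (b = 'n') && decide (c ≠ ' ') && decide (c ≠ '\\')) ||
        pvBad (b :: c :: r)) := rfl

theorem pvBad_cons_true (x : Char) (s : List Char) (hx : ¬ x = ' ') (h : pvBad (x :: s) = true) :
    pvBad s = true := by
  match s with
  | [] => exact absurd h (by simp [pvBad])
  | [b] => exact absurd h (by simp [pvBad])
  | b :: c :: r =>
    rw [pvBad_step] at h
    simpa [hx] using h

theorem pvBad_strip (t s : List Char) (ht : ∀ c ∈ t, ¬ c = ' ') (h : pvBad (t ++ s) = true) :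
    pvBad s = true := by
  induction t with
  | nil => exact h
  | cons c t ih =>
    exact ih (fun d hd => ht d (by simp [hd])) (pvBad_cons_true c (t ++ s) (ht c (by simp)) h)

theorem pvPhi_keep_lt (t : List Char) (X L : List (List Char))
    (h : pvPhi X < pvPhi (L.filter (fun u => u.length > 1))) :
    pvPhi ((if t.length > 1 then [t] else []) ++ X) <
      pvPhi ((t :: L).filter (fun u => u.length > 1)) := by
  rw [List.filter_cons]
  by_cases h1 : t.length > 1 <;> simp [h1, pvPhi_append, pvPhi] <;>
    simpa [pvPhi] using h

theorem pvSplitP_space (Y : List Char) : pvSplitP (' ' :: Y) = [] :: pvSplitP Y := by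
  simp [pvSplitP]

theorem pvSplitP_sep (t Y : List Char) (h : ∀ c ∈ t, ¬ c = ' ') :
    pvSplitP (t ++ ' ' :: Y) = t :: pvSplitP Y := by
  rw [pvSplitP_append t _ h]
  simp [pvSplitP_space, ← pvSplitP_head_tail Y]

theorem pvSplitP_cons_ne (a : Char) (X H : List Char) (T : List (List Char)) (ha : ¬ a = ' ')
    (hX : pvSplitP X = H :: T) : pvSplitP (a :: X) = (a :: H) :: T := by
  rw [show pvSplitP (a :: X) =
      (if a = ' ' then [] :: pvSplitP X
       else match pvSplitP X with | [] => [[a]] | p :: ps => (a :: p) :: ps) from rfl,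
    if_neg ha, hX]

theorem inner_lt (fuel : Nat) : ∀ (s : List Char), s.length < fuel → pvBad s = true →
    pvPhi (pvInnerAF fuel s) < pvPhi ((pvSplitP (pvSubst s)).filter (fun t => t.length > 1)) := by
  induction fuel with
  | zero => intro s h _; omega
  | succ f ih =>
    intro s hlen hbad
    match s with
    | [] => simp [pvBad] at hbad
    | c :: cs =>
      have hTok := pvTokA_eq (c :: cs)
      obtain ⟨t, ht⟩ : ∃ t, (c :: cs).takeWhile (fun c => decide (c ≠ '\\' ∧ c ≠ ' ')) = t := ⟨_, rfl⟩
      obtain ⟨r, hrd⟩ : ∃ r, (c :: cs).dropWhile (fun c => decide (c ≠ '\\' ∧ c ≠ ' ')) = r := ⟨_, rfl⟩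
      rw [ht, hrd] at hTok
      have hsplit : t ++ r = c :: cs := by
        rw [← ht, ← hrd]; exact List.takeWhile_append_dropWhile
      have htok : ∀ d ∈ t, ¬ d = '\\' ∧ ¬ d = ' ' := by
        intro d hd
        rw [← ht] at hd
        have := List.mem_takeWhile_imp hd
        simpa using this
      have htok_nosp : ∀ d ∈ t, ¬ d = ' ' := fun d hd => (htok d hd).2
      have htok_nobs : ∀ d ∈ t, ¬ d = '\\' := fun d hd => (htok d hd).1
      have hsubst : pvSubst (c :: cs) = t ++ pvSubst r := by
        rw [← hsplit]; exact pvSubst_append t (by exact r) htok_nobs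
      have hbad_r : pvBad r = true := by
        rw [← hsplit] at hbad
        exact pvBad_strip t _ htok_nosp hbad
      cases r with
      | nil => simp [pvBad] at hbad_r
      | cons d rest' =>
        have hd : (fun c => decide (c ≠ '\\' ∧ c ≠ ' ')) d = false := by
          have hh := List.head?_dropWhile_not (fun c => decide (c ≠ '\\' ∧ c ≠ ' ')) (c :: cs)
          rw [hrd] at hh
          simpa using hh
        have hdsep : d = '\\' ∨ d = ' ' := by
          simp at hd
          by_cases hb : d = '\\'
          · exact Or.inl hb
          · exact Or.inr (hd hb)
        have hstep : pvInnerAF (f + 1) (c :: cs) =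
            (if t.length > 1 then [t] else []) ++ pvInnerAF f (pvDropN rest') := by
          simp only [pvInnerAF, if_neg (by simp : ¬ (c :: cs : List Char) = [])]
          rw [hTok]
        have hlen_tr : t.length + (rest'.length + 1) = cs.length + 1 := by
          have := congrArg List.length hsplit
          simpa using this
        cases hdsep with
        | inl hbs =>
          subst hbs
          have hdrop_len : (pvDropN rest').length < f := by
            have hle : (pvDropN rest').length ≤ rest'.length := by
              unfold pvDropN; split <;> simp
            simp at hlen
            omega
          have hbad2 : pvBad rest' = true := pvBad_cons_true _ _ (by decide) hbad_r
          have hbad_drop : pvBad (pvDropN rest') = true := by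
            cases rest' with
            | nil => simp [pvBad] at hbad2
            | cons e x =>
              by_cases he : e = 'n'
              · subst he
                exact pvBad_cons_true _ _ (by decide) hbad2
              · rwa [pvDropN_cons_ne e x he]
          rw [hstep, hsubst, pvSubst_bs, pvSplitP_sep t _ htok_nosp]
          exact pvPhi_keep_lt t _ _ (ih _ hdrop_len hbad_drop)
        | inr hsp =>
          subst hsp
          have hsubst2 : pvSubst (' ' :: rest') = ' ' :: pvSubst rest' :=
            pvSubst_cons_ne _ _ (by decide)
          cases rest' with
          | nil => simp [pvBad] at hbad_r
          | cons e r2 =>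
            by_cases he : e = 'n'
            · subst he
              have hdrop : pvDropN ('n' :: r2) = r2 := rfl
              cases r2 with
              | nil => simp [pvBad] at hbad_r
              | cons g r3 =>
                have hlen_g : (g :: r3 : List Char).length < f := by
                  simp at hlen_tr hlen ⊢
                  omega
                by_cases hg : g = ' ' ∨ g = '\\'
                · -- not the site here: the window is further right
                  have hbad_ng : pvBad ('n' :: g :: r3) = true := by
                    have h1 := hbad_r
                    rw [pvBad_step] at h1
                    have hgw : (decide ((' ' : Char) = ' ') && decide (('n' : Char) = 'n') &&
                        decide (g ≠ ' ') && decide (g ≠ '\\')) = false := by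
                      cases hg with
                      | inl h' => simp [h']
                      | inr h' => simp [h']
                    rw [hgw] at h1
                    simpa using h1
                  have hbad_g : pvBad (g :: r3) = true :=
                    pvBad_cons_true _ _ (by decide) hbad_ng
                  obtain ⟨X, hX⟩ : ∃ X, pvSubst (g :: r3) = ' ' :: X := by
                    cases hg with
                    | inl h' => subst h'; exact ⟨pvSubst r3, pvSubst_cons_ne _ _ (by decide)⟩
                    | inr h' => subst h'; exact ⟨pvSubst (pvDropN r3), pvSubst_bs r3⟩
                  have hIH := ih _ hlen_g hbad_g
                  rw [hX, pvSplitP_space] at hIH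
                  have hns : pvSplitP ('n' :: ' ' :: X) = ['n'] :: pvSplitP X :=
                    pvSplitP_cons_ne 'n' (' ' :: X) [] (pvSplitP X) (by decide) (pvSplitP_space X)
                  rw [hstep, hdrop, hsubst, hsubst2, pvSubst_cons_ne 'n' _ (by decide), hX,
                    pvSplitP_sep t _ htok_nosp, hns]
                  refine pvPhi_keep_lt t _ _ ?_
                  rw [List.filter_cons]
                  simpa [List.filter_cons] using hIH
                · -- THE site: A loses the 'n', B keeps it
                  push_neg at hg
                  obtain ⟨hg1, hg2⟩ := hg
                  obtain ⟨H, T, hHT⟩ : ∃ H T, pvSplitP (pvSubst r3) = H :: T :=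
                    ⟨_, _, pvSplitP_head_tail (pvSubst r3)⟩
                  have hsg : pvSubst (g :: r3) = g :: pvSubst r3 := pvSubst_cons_ne _ _ hg2
                  have hQ : pvSplitP (g :: pvSubst r3) = (g :: H) :: T :=
                    pvSplitP_cons_ne g _ H T hg1 hHT
                  have hQ2 : pvSplitP ('n' :: g :: pvSubst r3) = ('n' :: g :: H) :: T :=
                    pvSplitP_cons_ne 'n' _ (g :: H) T (by decide) hQ
                  have hle : pvPhi (pvInnerAF f (g :: r3)) ≤
                      (1 + H.length) + pvPhi (T.filter (fun u => u.length > 1)) := by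
                    by_cases hbg : pvBad (g :: r3) = true
                    · have hIH := ih _ hlen_g hbg
                      rw [hsg, hQ, List.filter_cons] at hIH
                      by_cases hk : ((g :: H : List Char)).length > 1 <;>
                        simp only [hk, decide_true, decide_false, if_true, if_false] at hIH <;>
                        simp [pvPhi] at hIH ⊢ <;> omega
                    · have heq := inner_eq_aux f (g :: r3) hlen_g (by simpa using hbg)
                      rw [heq, hsg, hQ, List.filter_cons]
                      by_cases hk : ((g :: H : List Char)).length > 1 <;>
                        simp only [hk, decide_true, decide_false, if_true, if_false] <;>
                        simp [pvPhi] <;> omega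
                  rw [hstep, hdrop, hsubst, hsubst2, pvSubst_cons_ne 'n' _ (by decide), hsg,
                    pvSplitP_sep t _ htok_nosp, hQ2]
                  rw [List.filter_cons, List.filter_cons]
                  have hk2 : (('n' :: g :: H : List Char)).length > 1 := by simp
                  by_cases h1 : t.length > 1 <;>
                    simp only [h1, hk2, decide_true, decide_false, if_true, if_false] <;>
                    (simp [pvPhi_append, pvPhi] at hle ⊢; omega)
            · -- rest' does not start with 'n': the window is further right
              have hdrop : pvDropN (e :: r2) = e :: r2 := pvDropN_cons_ne e r2 he
              have hlen_e : (e :: r2 : List Char).length < f := by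
                simp at hlen_tr hlen ⊢
                omega
              have hbad_e : pvBad (e :: r2) = true := by
                have h1 := hbad_r
                cases r2 with
                | nil => simp [pvBad] at h1
                | cons g r3 =>
                  rw [pvBad_step] at h1
                  have hgw : (decide ((' ' : Char) = ' ') && decide (e = 'n') &&
                      decide (g ≠ ' ') && decide (g ≠ '\\')) = false := by simp [he]
                  rw [hgw] at h1
                  simpa using h1
              rw [hstep, hdrop, hsubst, hsubst2, pvSplitP_sep t _ htok_nosp]
              exact pvPhi_keep_lt t _ _ (ih _ hlen_e hbad_e)

theorem afterColon_none (s : List Char) (h : pvAfterColonB s = none) :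
    s.dropWhile (fun c => decide (c ≠ ':')) = [] := by
  induction s with
  | nil => simp
  | cons c cs ih =>
    by_cases hc : c = ':'
    · simp [pvAfterColonB, hc] at h
    · simp only [pvAfterColonB, if_neg hc] at h
      rw [show (c :: cs : List Char).dropWhile (fun c => decide (c ≠ ':')) =
          cs.dropWhile (fun c => decide (c ≠ ':')) from by simp [List.dropWhile, hc]]
      exact ih h

theorem afterColon_some (s rest : List Char) (h : pvAfterColonB s = some rest) :
    (s.dropWhile (fun c => decide (c ≠ ':'))).drop 1 = rest := by
  induction s with
  | nil => simp [pvAfterColonB] at h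
  | cons c cs ih =>
    by_cases hc : c = ':'
    · subst hc
      have h' : cs = rest := by simpa [pvAfterColonB] using h
      subst h'
      simp [List.dropWhile]
    · simp only [pvAfterColonB, if_neg hc] at h
      rw [show (c :: cs : List Char).dropWhile (fun c => decide (c ≠ ':')) =
          cs.dropWhile (fun c => decide (c ≠ ':')) from by simp [List.dropWhile, hc]]
      exact ih h

theorem afterColon_outer (s rest : List Char) (h : pvAfterColonB s = some rest) :
    pvOuterA s = pvInnerA rest := by
  induction s with
  | nil => simp [pvAfterColonB] at h
  | cons c cs ih =>
    by_cases hc : c = ':'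
    · subst hc
      have h' : cs = rest := by simpa [pvAfterColonB] using h
      subst h'
      simp [pvOuterA]
    · simp only [pvAfterColonB, if_neg hc] at h
      simp [pvOuterA, hc, ih h]

theorem parse_dep_generator_output_tight : Claim_exact_parse_dep_generator_output := by
  intro output _ hD hEq
  obtain ⟨w, hw, h1, h2, h3⟩ := hD
  simp only [List.mem_cons, List.mem_singleton, not_or] at h3
  have hb : pvBad ((output.toList.dropWhile (fun c => decide (c ≠ ':'))).drop 1) = true :=
    (pvBad_iff _).mpr ⟨w, hw, h1, h2, h3.1, h3.2.1⟩
  unfold parse_dep_generator_output parse_dep_generator_output_alt at hEq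
  cases hc : pvAfterColonB output.toList with
  | none =>
    rw [afterColon_none output.toList hc] at hb
    simp [pvBad] at hb
  | some rest =>
    rw [hc] at hEq
    simp only [replace2_eq, replace_eq, subst_eq, splitOn_eq] at hEq
    have hrest : (output.toList.dropWhile (fun c => decide (c ≠ ':'))).drop 1 = rest :=
      afterColon_some output.toList rest hc
    rw [hrest] at hb
    rw [afterColon_outer output.toList rest hc] at hEq
    have hlists : pvInnerA rest = (pvSplitP (pvSubst rest)).filter (fun t => t.length > 1) := by
      have := congrArg (List.map String.toList) hEq
      simpa [List.map_map, Function.comp_def, String.toList_ofList] using this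
    have hlt := inner_lt (rest.length + 1) rest (by omega) hb
    rw [show pvInnerAF (rest.length + 1) rest = pvInnerA rest from rfl, hlists] at hlt
    omega
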